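-- pv_equiv track=rewrite | github.com/ryanriccio1/GPGAgent | s2k/s2k.py | encode_count
-- ===== SOURCE A (Python) =====
-- def decode_count(count):
--     """ Perform EXPBIAS 6 macro as defined in the RFC. """
--     # RFC 4880: 3.7.1.3
--     return (16 + (count & 15)) << ((count >> 4) + 6)
--
-- def encode_count(iterations=65535):
--     """ Inverse of EXPBIAS 6 in RFC (found in libcrypt S2K). """
--     if iterations < 1024:
--         iterations = 1024
--     if iterations >= 65011712:
--         return 255
--
--     c = 0
--     count = iterations >> 6
--
--     while count >= 32:
--         c += 1
--         count >>= 1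
--
--     result = (c << 4) | (count - 16)
--     if decode_count(result) < iterations:
--         result += 1
--     return result
-- ===== SOURCE B (Python) =====
-- def decode_count(count):
--     """ Perform EXPBIAS 6 macro as defined in the RFC. """
--     return (16 + (count & 15)) << ((count >> 4) + 6)
--
-- def encode_count(iterations=65535):
--     """ Inverse of EXPBIAS 6: scan the encodable one-byte codes in order for the first
--     one whose decoded count reaches the requested iterations. """
--     if iterations < 1024:
--         iterations = 1024
--     for result in range(256):
--         if decode_count(result) >= iterations:
--             return result
--     return 255
-- ===== Notes on version B (the rewrite author's own statement) =====
-- stated objective: alternative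
-- what changed: Instead of A's bit-twiddling (shift out the mantissa with a halving-and-counting loop, pack exponent and mantissa, then patch with a decode check), B searches the one-byte code space directly, returning the first code whose decoded iteration count reaches the request; correctness rests on decode_count being strictly increasing over the encodable codes.
import Mathlib
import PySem

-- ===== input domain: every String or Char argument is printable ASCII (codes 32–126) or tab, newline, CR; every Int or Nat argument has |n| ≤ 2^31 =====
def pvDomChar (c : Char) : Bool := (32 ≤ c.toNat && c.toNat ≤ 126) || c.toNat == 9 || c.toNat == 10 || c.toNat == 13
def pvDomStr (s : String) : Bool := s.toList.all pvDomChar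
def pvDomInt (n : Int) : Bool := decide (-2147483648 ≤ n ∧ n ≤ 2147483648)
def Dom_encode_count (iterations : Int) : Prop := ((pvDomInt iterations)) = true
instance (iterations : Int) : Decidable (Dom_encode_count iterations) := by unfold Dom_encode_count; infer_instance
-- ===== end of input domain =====

-- B replaces A's halve-and-count bit juggling by a direct first-fit in-order search of the
-- encodable one-byte codes (objective: alternative; same cost class, different algorithm).


-- ===== PORT A =====
-- decode_count: the shift amount (count >> 4) + 6 is nonnegative for every count this
-- function is applied to (result ≥ 0); .toNat is exact there.
def decodeCountA (count : Int) : Int :=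
  (16 + PySem.Int.band count 15) <<< ((count >>> (4:ℕ)) + 6).toNat

-- the 'while count >= 32: c += 1; count >>= 1' loop, state (c, count)
def loopA (c count : Int) : Int × Int :=
  if 32 ≤ count then loopA (c + 1) (count >>> (1:ℕ))
  else (c, count)
termination_by count.toNat
decreasing_by
  simp only [Int.shiftRight_eq_div_pow, pow_one] at *
  omega

def encode_count (iterations : Int) : Int :=
  let iterations := if iterations < 1024 then 1024 else iterations
  if 65011712 ≤ iterations then 255
  else
    let p := loopA 0 (iterations >>> (6:ℕ))
    let result := PySem.Int.bor (p.1 <<< (4:ℕ)) (p.2 - 16)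
    if decodeCountA result < iterations then result + 1 else result

-- ===== PORT B =====
def decodeCountB (count : Int) : Int :=
  (16 + PySem.Int.band count 15) <<< ((count >>> (4:ℕ)) + 6).toNat

-- 'for result in range(256): if decode_count(result) >= iterations: return result' / 'return 255'
def scanB (iterations : Int) (r : ℕ) : Int :=
  if r < 256 then
    if iterations ≤ decodeCountB r then (r : Int)
    else scanB iterations (r + 1)
  else 255
termination_by 256 - r

def encode_count_alt (iterations : Int) : Int :=
  let iterations := if iterations < 1024 then 1024 else iterations
  scanB iterations 0

-- ===== PRECONDITION & SPEC =====
def Spec_encode_count (iterations : Int) (out : Int) : Prop := out = encode_count_alt iterations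
instance (iterations : Int) (out : Int) : Decidable (Spec_encode_count iterations out) := by unfold Spec_encode_count; infer_instance

-- ===== CLAIM =====
def Claim_equal_encode_count : Prop := ∀ (iterations : Int), Dom_encode_count iterations → Spec_encode_count iterations (encode_count iterations)

-- ===== LEMMAS AND PROOFS =====

lemma decB_eq_decA (x : Int) : decodeCountB x = decodeCountA x := rfl

-- Nat-level value of decode_count on a code r < 256
def DN (r : ℕ) : ℕ := (16 + r % 16) <<< (r / 16 + 6)

-- kernel-checked: decode agrees with DN on the whole code space, and bit-packing is + here
set_option maxRecDepth 100000 in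
lemma formula : ∀ r ∈ List.range 256,
    decodeCountB ((r:ℕ):Int) = ((DN r : ℕ) : Int) := by decide

set_option maxRecDepth 100000 in
lemma bor_fact : ∀ k ∈ List.range 16, ∀ m ∈ List.range 16,
    PySem.Int.bor (((k:ℕ):Int) <<< (4:ℕ)) ((m:ℕ):Int) = ((16*k + m : ℕ) : Int) := by decide

lemma DN_mono (r : ℕ) : DN r < DN (r + 1) := by
  unfold DN
  rw [Nat.shiftLeft_eq, Nat.shiftLeft_eq]
  have hp := Nat.two_pow_pos (r/16 + 6)
  by_cases hm : r % 16 = 15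
  · have h1 : (r+1) % 16 = 0 := by omega
    have h2 : (r+1) / 16 = r / 16 + 1 := by omega
    have h3 : r / 16 + 1 + 6 = (r / 16 + 6) + 1 := by omega
    rw [hm, h1, h2, h3]
    have hps : (2:ℕ)^(r/16+6+1) = 2^(r/16+6) * 2 := pow_succ 2 (r/16+6)
    nlinarith
  · have h1 : (r+1) % 16 = r % 16 + 1 := by omega
    have h2 : (r+1) / 16 = r / 16 := by omega
    rw [h1, h2]
    nlinarith

lemma decB_mono_adj (r : ℕ) (h : r < 255) :
    decodeCountB ((r:ℕ):Int) < decodeCountB (((r+1:ℕ)):Int) := by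
  rw [formula r (List.mem_range.mpr (by omega)),
      formula (r+1) (List.mem_range.mpr (by omega))]
  exact_mod_cast DN_mono r

lemma dec255 : decodeCountB (((255:ℕ)):Int) = 65011712 := by
  rw [formula 255 (List.mem_range.mpr (by omega))]
  norm_num [DN, Nat.shiftLeft_eq]

lemma decB_le (i j : ℕ) (hij : i ≤ j) (hj : j ≤ 255) :
    decodeCountB i ≤ decodeCountB j := by
  induction j with
  | zero => interval_cases i; exact le_refl _
  | succ j ih =>
    rcases Nat.lt_or_ge i (j+1) with h | h
    · exact le_trans (ih (by omega) (by omega))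
        (le_of_lt (decB_mono_adj j (by omega)))
    · have : i = j + 1 := by omega
      subst this; exact le_refl _

lemma decB_lt (i j : ℕ) (hij : i < j) (hj : j ≤ 255) :
    decodeCountB i < decodeCountB j := by
  refine lt_of_le_of_lt (decB_le i (j-1) (by omega) (by omega)) ?_
  have h2 := decB_mono_adj (j-1) (by omega)
  rw [show j - 1 + 1 = j from by omega] at h2
  exact h2

-- the scan returns the first qualifying code
lemma scan_found (its : Int) (rA : ℕ) (h255 : rA < 256)
    (hge : its ≤ decodeCountB rA) (hlt : ∀ j : ℕ, j < rA → decodeCountB j < its) :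
    ∀ (d s : ℕ), rA ≤ s + d → s ≤ rA → scanB its s = rA := by
  intro d
  induction d with
  | zero =>
    intro s h1 h2
    have : s = rA := by omega
    subst this
    rw [scanB, if_pos h255, if_pos hge]
  | succ d ih =>
    intro s h1 h2
    rw [scanB]
    have hs : s < 256 := by omega
    simp only [hs, if_true]
    by_cases hq : its ≤ decodeCountB s
    · have : ¬ s < rA := fun h => absurd (hlt s h) (by omega)
      have hsr : s = rA := by omega
      rw [if_pos hq, hsr]
    · have hsr : s < rA := by
        rcases Nat.lt_or_ge s rA with h | h
        · exact h
        · have : s = rA := by omega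
          subst this; exact absurd hge hq
      simp only [hq, if_false]
      exact ih (s+1) (by omega) (by omega)

-- the scan falls through when no code qualifies
lemma scan_none (its : Int) (h : ∀ j : ℕ, j < 256 → decodeCountB j < its) :
    ∀ (d s : ℕ), 256 ≤ s + d → scanB its s = 255 := by
  intro d
  induction d with
  | zero =>
    intro s hs
    rw [scanB]
    simp [show ¬ s < 256 by omega]
  | succ d ih =>
    intro s hs
    rw [scanB]
    by_cases h256 : s < 256
    · simp only [h256, if_true]
      have : ¬ its ≤ decodeCountB s := by
        have := h s h256; omega
      simp only [this, if_false]
      exact ih (s+1) (by omega)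
    · simp [h256]

-- loop characterisation: the loop shifts right k times until the value lands in [16,32)
lemma loopA_spec : ∀ (n : ℕ) (c count : Int), count.toNat = n → 16 ≤ count →
    ∃ k : ℕ, loopA c count = (c + (k:Int), count >>> k) ∧
      16 ≤ count >>> k ∧ count >>> k < 32 := by
  intro n
  induction n using Nat.strong_induction_on with
  | _ n ih =>
    intro c count hn h16
    rw [loopA]
    by_cases h32 : 32 ≤ count
    · simp only [h32, if_true]
      have hhalf : 16 ≤ count >>> (1:ℕ) := by
        simp only [Int.shiftRight_eq_div_pow, pow_one]; omega
      have hlt : (count >>> (1:ℕ)).toNat < n := by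
        simp only [Int.shiftRight_eq_div_pow, pow_one]; omega
      obtain ⟨k, hk, hlo, hhi⟩ := ih _ hlt (c+1) (count >>> (1:ℕ)) rfl hhalf
      have hsh : (count >>> (1:ℕ)) >>> k = count >>> (k+1) := by
        simp only [Int.shiftRight_eq_div_pow]
        rw [Int.ediv_ediv_of_nonneg (show (0:Int) ≤ ((2^1 : ℕ) : Int) by positivity)]
        congr 1
        push_cast
        ring
      refine ⟨k + 1, ?_, by rw [← hsh]; exact hlo, by rw [← hsh]; exact hhi⟩
      rw [hk, hsh]
      simp only [Prod.mk.injEq]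
      exact ⟨by push_cast; ring, trivial⟩
    · simp only [h32, if_false]
      have h0 : count >>> (0:ℕ) = count := by
        simp [Int.shiftRight_eq_div_pow]
      exact ⟨0, by simp [h0], by rw [h0]; omega, by rw [h0]; omega⟩

-- ===== VERDICT =====
theorem encode_count_spec : Claim_equal_encode_count := by
  intro its _
  unfold Spec_encode_count encode_count encode_count_alt
  set I := if its < 1024 then 1024 else its with hIdef
  have hI : 1024 ≤ I := by rw [hIdef]; split <;> omega
  by_cases hbig : 65011712 ≤ I
  · -- A returns 255; the scan also ends at 255
    simp only [hbig, if_true]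
    by_cases heq : I ≤ 65011712
    · -- I = 65011712 = decode(255): 255 is the first (and only) qualifying code
      refine (scan_found I 255 (by omega) ?_ ?_ 256 0 (by omega) (by omega)).symm
      · rw [dec255]; exact heq
      · intro j hj
        have h1 : decodeCountB ((j:ℕ):Int) ≤ decodeCountB ((254:ℕ):Int) :=
          decB_le j 254 (by omega) (by omega)
        have h2 : decodeCountB ((254:ℕ):Int) < decodeCountB ((255:ℕ):Int) :=
          decB_mono_adj 254 (by omega)
        calc decodeCountB ((j:ℕ):Int) ≤ decodeCountB ((254:ℕ):Int) := h1
          _ < decodeCountB ((255:ℕ):Int) := h2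
          _ = 65011712 := dec255
          _ ≤ I := hbig
    · -- I > decode(255): no code qualifies, the scan falls through to 255
      refine (scan_none I ?_ 256 0 (by omega)).symm
      intro j hj
      have h1 : decodeCountB ((j:ℕ):Int) ≤ decodeCountB ((255:ℕ):Int) :=
        decB_le j 255 (by omega) (by omega)
      rw [dec255] at h1
      omega
  · -- main branch: A's packed-and-patched code equals the first qualifying code
    simp only [hbig, if_false]
    have hIub : I < 65011712 := by omega
    set count0 := I >>> (6:ℕ) with hc0
    have hc0v : count0 = I / 64 := by
      rw [hc0, Int.shiftRight_eq_div_pow]; norm_num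
    have hc0lo : 16 ≤ count0 := by omega
    have hc0hi : count0 ≤ 1015807 := by omega
    obtain ⟨K, hK, hlo, hhi⟩ := loopA_spec count0.toNat 0 count0 rfl hc0lo
    set cnt := count0 >>> K with hcnt
    have hcv : cnt = count0 / (2^K : Int) := by
      rw [hcnt]; simp [Int.shiftRight_eq_div_pow]
    have hPpos : (0:Int) < 2^K := by positivity
    have hdl : cnt * 2^K ≤ count0 := by
      rw [hcv]; exact Int.ediv_mul_le count0 (by positivity)
    have hdu : count0 < (cnt + 1) * 2^K := by
      rw [hcv]; exact Int.lt_ediv_add_one_mul_self count0 hPpos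
    -- K ≤ 15
    have hK15 : K < 16 := by
      by_contra hcon
      have h2 : (2:Int)^16 ≤ 2^K := pow_le_pow_right₀ (by norm_num) (by omega)
      have : 16 * 2^K ≤ cnt * 2^K := by
        apply mul_le_mul_of_nonneg_right hlo (le_of_lt hPpos)
      nlinarith
    set m : ℕ := (cnt - 16).toNat with hmdef
    have hmv : (m:Int) = cnt - 16 := by rw [hmdef]; omega
    have hm16 : m < 16 := by omega
    have hr0 : PySem.Int.bor (((0:Int) + (K:Int)) <<< (4:ℕ)) (cnt - 16)
        = ((16*K + m : ℕ) : Int) := by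
      rw [zero_add, ← hmv]
      exact bor_fact K (by simp [hK15]) m (by simp [hm16])
    have hDN1 : DN (16*K + m) = (16 + m) * 2^(K+6) := by
      unfold DN
      rw [Nat.shiftLeft_eq]
      have e1 : (16*K + m) % 16 = m := by omega
      have e2 : (16*K + m) / 16 = K := by omega
      rw [e1, e2]
    have hdecr0v : decodeCountA ((16*K + m : ℕ) : Int) = cnt * 2^(K+6) := by
      rw [← decB_eq_decA, formula (16*K + m) (List.mem_range.mpr (by omega)), hDN1]
      push_cast
      rw [hmv]
      ring
    -- bounds relating decode values to I
    have hI64 : count0 * 64 ≤ I ∧ I < (count0 + 1) * 64 := by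
      constructor <;> omega
    have hA_le : cnt * 2^(K+6) ≤ I := by
      have : cnt * 2^(K+6) = (cnt * 2^K) * 64 := by rw [pow_add]; ring
      rw [this]
      calc (cnt * 2^K) * 64 ≤ count0 * 64 := by nlinarith [hdl]
        _ ≤ I := hI64.1
    have hA_ub : I < (cnt + 1) * 2^(K+6) := by
      have he : (cnt + 1) * 2^(K+6) = ((cnt+1) * 2^K) * 64 := by rw [pow_add]; ring
      rw [he]
      have : count0 + 1 ≤ (cnt+1) * 2^K := Int.lt_iff_add_one_le.mp hdu
      calc I < (count0 + 1) * 64 := hI64.2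
        _ ≤ ((cnt+1) * 2^K) * 64 := by nlinarith
    rw [hK, hr0]
    by_cases hpatch : decodeCountA ((16*K + m : ℕ) : Int) < I
    · -- A increments: first qualifying code is 16K+m+1
      simp only [hpatch, if_true]
      have hr0lt : 16*K + m < 255 := by
        by_contra hcon
        have hKm : K = 15 ∧ m = 15 := by omega
        have : decodeCountA ((16*K + m : ℕ) : Int) = cnt * 2^(K+6) := hdecr0v
        rw [this] at hpatch
        have : cnt = 31 := by omega
        rw [hKm.1, this] at hpatch
        norm_num at hpatch
        omega
      have hDN2 : DN (16*K + m + 1) = (17 + m) * 2^(K+6) := by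
        unfold DN
        rw [Nat.shiftLeft_eq]
        by_cases hm15 : m = 15
        · have e1 : (16*K + m + 1) % 16 = 0 := by omega
          have e2 : (16*K + m + 1) / 16 = K + 1 := by omega
          have e3 : K + 1 + 6 = (K + 6) + 1 := by omega
          have hps : (2:ℕ)^((K+6)+1) = 2^(K+6) * 2 := pow_succ 2 (K+6)
          rw [e1, e2, e3, hps, hm15]
          ring
        · have e1 : (16*K + m + 1) % 16 = m + 1 := by omega
          have e2 : (16*K + m + 1) / 16 = K := by omega
          rw [e1, e2]
          ring
      have hdecsv : decodeCountB ((16*K + m + 1 : ℕ) : Int) = (cnt + 1) * 2^(K+6) := by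
        rw [formula (16*K + m + 1) (List.mem_range.mpr (by omega)), hDN2]
        push_cast
        rw [hmv]
        ring
      have := scan_found I (16*K + m + 1) (by omega)
        (by rw [hdecsv]; exact le_of_lt hA_ub)
        (by
          intro j hj
          have hj' : j ≤ 16*K + m := by omega
          have h1 : decodeCountB j ≤ decodeCountB (16*K + m) :=
            decB_le j (16*K + m) hj' (by omega)
          have h2 : decodeCountB ((16*K + m : ℕ) : Int) = decodeCountA ((16*K + m : ℕ) : Int) :=
            decB_eq_decA _
          exact lt_of_le_of_lt (h1.trans_eq h2) hpatch)
        256 0 (by omega) (by omega)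
      rw [this]; push_cast; ring
    · -- no patch: decode(16K+m) = I exactly; it is the first qualifying code
      simp only [hpatch, if_false]
      have hge : I ≤ decodeCountA ((16*K + m : ℕ) : Int) := by omega
      have := scan_found I (16*K + m) (by omega)
        (by rw [decB_eq_decA]; exact hge)
        (by
          intro j hj
          have h1 : decodeCountB j < decodeCountB (16*K + m) :=
            decB_lt j (16*K + m) hj (by omega)
          have h2 : decodeCountB ((16*K + m : ℕ) : Int) = decodeCountA ((16*K + m : ℕ) : Int) :=
            decB_eq_decA _
          have h3 : decodeCountA ((16*K + m : ℕ) : Int) ≤ I := by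
            rw [hdecr0v]; exact hA_le
          exact lt_of_lt_of_le (h1.trans_eq h2) h3)
        256 0 (by omega) (by omega)
      exact this.symm
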